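-- pv_equiv track=rewrite | github.com/arcaillon/TIPE-2022 | Polynomes et Zernike/Polynomes.py | mult2v
-- ===== SOURCE A (Python) =====
-- import copy
--
-- def normalize1v (pol1):
--     s=copy.deepcopy (pol1)
--     while s[-1]==0 and len(s)>1:
--         s.pop(len(s)-1)
--     return s
--
-- def somme1v (pol1,pol2):
--     p=copy.deepcopy (pol1)
--     q=copy.deepcopy(pol2)
--     p1=normalize1v(p)
--     q1=normalize1v(q)
--     n,m=len(p1),len(q1)
--     if n > m :
--         s = p1
--         for i in range (m) :
--             s[i] += q[i]
--     else :
--         s = q1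
--         for i in range (n) :
--             s[i] += p[i]
--     return s
--
-- def  normalize2v (pol):
--     p=copy.deepcopy(pol)
--     n=len(p)
--     for i in range (n):
--         p[i]=normalize1v(p[i])
--     while p != [[0]] and p[-1] == [0]:
--         p.pop(-1)
--     m=len(p[0])
--     n=len(p)
--     for k in range (n):
--         m=max (m, len(p[k]))
--     for i in range (n):
--         l=len(p[i])
--         while l<m:
--             p[i].append(0)
--             l=len(p[i])
--     return p
--
-- def somme2v (pol1,pol2):
--     p=copy.deepcopy(pol1)
--     q=copy.deepcopy(pol2)
--     n=len(p)
--     m=len(q)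
--     if n<m :
--         s=copy.deepcopy(q)
--         for i in range (n):
--             s[i]=somme1v(p[i],q[i])
--     else:
--         s=copy.deepcopy(p)
--         for i in range (m):
--             s[i]=somme1v(p[i],q[i])
--     return normalize2v(s)
--
-- def mult_scal2v (pol,x):
--     p=copy.deepcopy (pol)
--     s=normalize2v(p)
--     for i in range (len(s)):
--         for j in range (len(s[0])):
--             s[i][j] *= x
--     return s
--
-- def mult_monom2v (pol,x,i,j):
--     p=copy.deepcopy (pol)
--     s=mult_scal2v(p,x)
--     n=len(s)
--     m=len(s[0])
--     z1=[0]*j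
--     for k in range (n):                 #je rajoute à chaque sous liste autant de zéro que le degré du monom en Y
--         s[k]=z1+s[k]
--     z2=[[0]*(m+j)]*i                    #decale le degré du polynome en X
--     return z2+s
--
-- def mult2v (pol1,pol2):
--     p1=copy.deepcopy(pol1)
--     p2=copy.deepcopy(pol2)
--     s1,s2=normalize2v(p1),normalize2v(p2)
--     n,m = len(s1),len(s1[0])
--     f=[[0]]
--     for i in range (n):
--         for j in range (m):
--             f=somme2v(f,mult_monom2v(s2, s1[i][j], i, j))
--     return f
-- ===== SOURCE B (Python) =====
-- def _trim(r):
--     k = len(r)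
--     while k > 1 and r[k-1] == 0:
--         k -= 1
--     return r[:k]
--
-- def _canon(g):
--     rows = [_trim(r) for r in g]
--     d = len(rows)
--     while d > 1 and rows[d-1] == [0]:
--         d -= 1
--     rows = rows[:d]
--     m = 0
--     for r in rows:
--         m = max(m, len(r))
--     return [r + [0] * (m - len(r)) for r in rows]
--
-- def _coeff(p, i, j):
--     return p[i][j] if i < len(p) and j < len(p[i]) else 0
--
-- def mult2v(pol1, pol2):
--     n1, n2 = len(pol1), len(pol2)
--     m1 = max(map(len, pol1))
--     m2 = max(map(len, pol2))
--     n = n1 + n2 - 1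
--     m = m1 + m2 - 1
--     g = [[sum(pol1[i][j] * _coeff(pol2, k - i, l - j)
--               for i in range(max(0, k - n2 + 1), min(k + 1, n1))
--               for j in range(max(0, l - m2 + 1), min(l + 1, len(pol1[i]))))
--           for l in range(m)]
--          for k in range(n)]
--     return _canon(g)
-- ===== Notes on version B (the rewrite author's own statement) =====
-- stated objective: faster
-- what changed: Replaces the shift-and-add loop (one deepcopy-heavy somme2v/normalize2v per input coefficient) by a direct 2-D convolution that computes each output coefficient as a closed-form sum over the overlap, then canonicalizes once.
import Mathlib
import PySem

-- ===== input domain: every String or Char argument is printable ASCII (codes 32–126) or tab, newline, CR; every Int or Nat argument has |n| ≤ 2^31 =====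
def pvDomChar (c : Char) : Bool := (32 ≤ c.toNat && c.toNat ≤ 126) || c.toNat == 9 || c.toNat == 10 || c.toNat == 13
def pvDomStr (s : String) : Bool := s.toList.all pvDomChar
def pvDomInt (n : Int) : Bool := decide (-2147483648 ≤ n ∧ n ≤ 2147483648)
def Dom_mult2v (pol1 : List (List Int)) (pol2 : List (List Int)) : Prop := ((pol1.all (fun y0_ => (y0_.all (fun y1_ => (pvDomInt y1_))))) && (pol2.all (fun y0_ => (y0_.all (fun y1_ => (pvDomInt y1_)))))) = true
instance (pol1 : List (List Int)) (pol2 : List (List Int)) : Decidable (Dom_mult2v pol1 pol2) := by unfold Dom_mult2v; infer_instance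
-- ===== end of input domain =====

-- B replaces A's shift-and-add accumulation (one somme2v/normalize2v pass per coefficient of pol1)
-- by a direct 2-D convolution over the index ranges where the factors overlap, normalized once at the end.

-- ===== PORT A =====
def normalize1v (s : List Int) : List Int :=
  if h : s.getLast? = some 0 ∧ 1 < s.length then
    normalize1v s.dropLast
  else s
termination_by s.length
decreasing_by simp only [List.length_dropLast]; omega

def somme1vAdd (s q : List Int) (k : Nat) : List Int :=
  s.mapIdx (fun i a => if i < k then a + q.getD i 0 else a)

def somme1v (p q : List Int) : List Int :=
  let p1 := normalize1v p
  let q1 := normalize1v q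
  if q1.length < p1.length then somme1vAdd p1 q q1.length
  else somme1vAdd q1 p p1.length

def trimRows (p : List (List Int)) : List (List Int) :=
  if h : p ≠ [[0]] ∧ p.getLast? = some [0] then trimRows p.dropLast else p
termination_by p.length
decreasing_by
  have : p ≠ [] := by rintro rfl; simp at h
  simp only [List.length_dropLast]
  cases p with
  | nil => simp at this
  | cons a t => simp

def normalize2v (pol : List (List Int)) : List (List Int) :=
  let p := trimRows (pol.map normalize1v)
  let m := p.foldl (fun m r => max m r.length) (p.headD []).length
  p.map (fun r => r ++ List.replicate (m - r.length) 0)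

def somme2v (p q : List (List Int)) : List (List Int) :=
  if p.length < q.length then
    normalize2v (List.zipWith somme1v p q ++ q.drop p.length)
  else
    normalize2v (List.zipWith somme1v p q ++ p.drop q.length)

def mult_scal2v (pol : List (List Int)) (x : Int) : List (List Int) :=
  (normalize2v pol).map (fun r => r.map (fun a => a * x))

def mult_monom2v (pol : List (List Int)) (x : Int) (i j : Nat) : List (List Int) :=
  let s := mult_scal2v pol x
  let m := (s.headD []).length
  List.replicate i (List.replicate (m + j) 0) ++ s.map (fun r => List.replicate j 0 ++ r)

def mult2v (pol1 : List (List Int)) (pol2 : List (List Int)) : List (List Int) :=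
  let s1 := normalize2v pol1
  let s2 := normalize2v pol2
  let n := s1.length
  let m := (s1.headD []).length
  (List.range n).foldl (fun f i =>
    (List.range m).foldl (fun f j =>
      somme2v f (mult_monom2v s2 ((s1.getD i []).getD j 0) i j)) f) [[0]]

-- ===== PORT B =====
def trimLen (r : List Int) (k : Nat) : Nat :=
  if h : 1 < k ∧ r.getD (k - 1) 0 = 0 then trimLen r (k - 1) else k
termination_by k
decreasing_by omega

def trimB (r : List Int) : List Int := r.take (trimLen r r.length)

def lastRowCount (rows : List (List Int)) (d : Nat) : Nat :=
  if h : 1 < d ∧ rows.getD (d - 1) [] = [0] then lastRowCount rows (d - 1) else d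
termination_by d
decreasing_by omega

def canonB (g : List (List Int)) : List (List Int) :=
  let rows0 := g.map trimB
  let rows := rows0.take (lastRowCount rows0 rows0.length)
  let m := rows.foldl (fun m r => max m r.length) 0
  rows.map (fun r => r ++ List.replicate (m - r.length) 0)

def coeffB (p : List (List Int)) (i j : Nat) : Int := (p.getD i []).getD j 0

def mult2v_alt (pol1 : List (List Int)) (pol2 : List (List Int)) : List (List Int) :=
  let n1 := pol1.length
  let n2 := pol2.length
  let m1 := pol1.foldl (fun m r => max m r.length) 0
  let m2 := pol2.foldl (fun m r => max m r.length) 0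
  canonB ((List.range (n1 + n2 - 1)).map (fun k =>
    (List.range (m1 + m2 - 1)).map (fun l =>
      ((List.range' ((k+1) - n2) (min (k+1) n1 - ((k+1) - n2))).map (fun i =>
        ((List.range' ((l+1) - m2) (min (l+1) (pol1.getD i []).length - ((l+1) - m2))).map (fun j =>
          coeffB pol1 i j * coeffB pol2 (k - i) (l - j))).sum)).sum)))

-- ===== PRECONDITION & SPEC =====
-- Pre_ excludes exactly the inputs on which the Python A raises IndexError:
-- an empty polynomial or a polynomial containing an empty row (normalize1v does s[-1] on it).
def Pre_mult2v (pol1 : List (List Int)) (pol2 : List (List Int)) : Prop :=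
  pol1 ≠ [] ∧ pol2 ≠ [] ∧ (∀ r ∈ pol1, r ≠ []) ∧ (∀ r ∈ pol2, r ≠ [])
instance (pol1 : List (List Int)) (pol2 : List (List Int)) : Decidable (Pre_mult2v pol1 pol2) := by
  unfold Pre_mult2v; infer_instance

def pvWitness_mult2v : List (List Int) × List (List Int) := ([[1, 2], [3, 0]], [[0, 1]])

def Spec_mult2v (pol1 : List (List Int)) (pol2 : List (List Int)) (out : List (List Int)) : Prop :=
  out = mult2v_alt pol1 pol2
instance (pol1 : List (List Int)) (pol2 : List (List Int)) (out : List (List Int)) :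
    Decidable (Spec_mult2v pol1 pol2 out) := by
  unfold Spec_mult2v; infer_instance

-- ===== CLAIM =====
def Claim_equal_mult2v : Prop := ∀ (pol1 : List (List Int)) (pol2 : List (List Int)),
  Dom_mult2v pol1 pol2 → Pre_mult2v pol1 pol2 → Spec_mult2v pol1 pol2 (mult2v pol1 pol2)

-- ===== LEMMAS AND PROOFS =====

def RowsNE (p : List (List Int)) : Prop := p ≠ [] ∧ ∀ r ∈ p, r ≠ []

def Canon (P : List (List Int)) : Prop :=
  1 ≤ P.length ∧ 1 ≤ (P.headD []).length ∧ (∀ r ∈ P, r.length = (P.headD []).length) ∧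
  (P = [[0]] ∨ ((∃ j, coeffB P (P.length - 1) j ≠ 0) ∧ (∃ i, coeffB P i ((P.headD []).length - 1) ≠ 0)))

def rowMax (a : Nat) (P : List (List Int)) : Nat := P.foldl (fun m r => max m r.length) a

def Fsum (P Q : List (List Int)) (k l : Nat) : Int :=
  ((List.range (k+1)).map (fun i =>
    ((List.range (l+1)).map (fun j => coeffB P i j * coeffB Q (k-i) (l-j))).sum)).sum

-- ===== basic coeff lemmas =====
theorem coeffB_zero_of_len (P : List (List Int)) (i j : Nat) (h : P.length ≤ i) : coeffB P i j = 0 := by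
  unfold coeffB; rw [List.getD_eq_default _ _ h]; simp

theorem coeffB_zero_of_row (P : List (List Int)) (i j : Nat) (h : (P.getD i []).length ≤ j) :
    coeffB P i j = 0 := by
  unfold coeffB; rw [List.getD_eq_default _ _ h]

theorem coeffB_single_zero (k l : Nat) : coeffB [[0]] k l = 0 := by
  cases k with
  | zero =>
    show (([0] : List Int)).getD l 0 = 0
    cases l with
    | zero => rfl
    | succ l => rfl
  | succ k => exact coeffB_zero_of_len _ _ _ (by simp)

theorem headD_mem (P : List (List Int)) (h : P ≠ []) : P.headD [] ∈ P := by
  cases P with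
  | nil => simp at h
  | cons a t => simp

-- ===== rowMax lemmas =====
theorem rowMax_le_init (P : List (List Int)) : ∀ a, a ≤ rowMax a P := by
  induction P with
  | nil => intro a; simp [rowMax]
  | cons r t ih => intro a; simpa [rowMax] using le_trans (Nat.le_max_left a r.length) (ih _)

theorem len_le_rowMax (P : List (List Int)) (r : List Int) (h : r ∈ P) : ∀ a, r.length ≤ rowMax a P := by
  induction P with
  | nil => simp at h
  | cons s t ih =>
    intro a
    rcases List.mem_cons.1 h with h1 | h2
    · subst h1; simpa [rowMax] using le_trans (Nat.le_max_right a r.length) (rowMax_le_init t _)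
    · simpa [rowMax] using ih h2 _

theorem rowMax_cons (a : Nat) (r : List Int) (t : List (List Int)) :
    rowMax a (r :: t) = rowMax (max a r.length) t := rfl

theorem rowMax_init_max (P : List (List Int)) : ∀ a, rowMax a P = max a (rowMax 0 P) := by
  induction P with
  | nil => intro a; simp [rowMax]
  | cons r t ih =>
    intro a
    rw [rowMax_cons, rowMax_cons, ih (max a r.length), ih (max 0 r.length)]
    omega

theorem rowMax_attained (P : List (List Int)) (h : P ≠ []) : ∃ r ∈ P, rowMax 0 P = r.length := by
  induction P with
  | nil => simp at h
  | cons r t ih =>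
    rcases List.eq_nil_or_concat t with h1 | _
    · subst h1; exact ⟨r, by simp, by simp [rowMax]⟩
    · have ht : t ≠ [] := by rintro rfl; simp_all
      obtain ⟨r', hr', hlen⟩ := ih ht
      have : rowMax 0 (r :: t) = max r.length (rowMax 0 t) := by
        rw [rowMax_cons, rowMax_init_max]; omega
      by_cases hc : rowMax 0 t ≤ r.length
      · exact ⟨r, by simp, by omega⟩
      · exact ⟨r', by simp [hr'], by omega⟩

-- ===== normalize1v lemmas =====
theorem normalize1v_nil : normalize1v [] = [] := by
  unfold normalize1v; simp

theorem dropLast_getD (s : List Int) (j : Nat) (h : j + 1 < s.length) :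
    s.dropLast.getD j 0 = s.getD j 0 := by
  rw [List.getD_eq_getElem _ _ (by simp [List.length_dropLast]; omega),
      List.getD_eq_getElem _ _ (by omega), List.getElem_dropLast]

theorem getLast_getD (s : List Int) (h : s ≠ []) : s.getD (s.length - 1) 0 = s.getLast h := by
  rw [List.getLast_eq_getElem h, List.getD_eq_getElem _ _ (by cases s; simp at h; simp)]

theorem normalize1v_getD (s : List Int) (j : Nat) : (normalize1v s).getD j 0 = s.getD j 0 := by
  fun_induction normalize1v s with
  | case1 s h ih =>
    rw [ih]
    have hs : s ≠ [] := by rintro rfl; simp at h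
    by_cases h1 : j + 1 < s.length
    · exact dropLast_getD s j h1
    · by_cases h2 : j = s.length - 1
      · subst h2
        rw [List.getD_eq_default _ _ (by simp [List.length_dropLast])]
        rw [getLast_getD s hs]
        have := List.getLast?_eq_some_getLast hs
        rw [this] at h
        exact (Option.some_inj.1 h.1).symm
      · rw [List.getD_eq_default _ _ (by simp [List.length_dropLast]; omega),
            List.getD_eq_default _ _ (by omega)]
  | case2 s h => rfl

theorem normalize1v_ne (s : List Int) (h : s ≠ []) : normalize1v s ≠ [] := by
  fun_induction normalize1v s with
  | case1 s hg ih =>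
    exact ih (by
      have : 1 < s.length := hg.2
      intro hnil
      have := congrArg List.length hnil
      simp [List.length_dropLast] at this
      omega)
  | case2 s hg => exact h

theorem normalize1v_stop (s : List Int) :
    ¬((normalize1v s).getLast? = some 0 ∧ 1 < (normalize1v s).length) := by
  fun_induction normalize1v s with
  | case1 s hg ih => exact ih
  | case2 s hg => exact hg

-- ===== somme1v lemmas =====
theorem somme1vAdd_length (s q : List Int) (k : Nat) : (somme1vAdd s q k).length = s.length := by
  simp [somme1vAdd]

theorem somme1vAdd_getD (s q : List Int) (k j : Nat) :
    (somme1vAdd s q k).getD j 0 =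
      if j < s.length then (if j < k then s.getD j 0 + q.getD j 0 else s.getD j 0) else 0 := by
  by_cases hj : j < s.length
  · rw [if_pos hj, List.getD_eq_getElem _ _ (by simp [somme1vAdd]; omega)]
    simp only [somme1vAdd, List.getElem_mapIdx]
    rw [List.getD_eq_getElem _ _ hj]
  · rw [if_neg hj, List.getD_eq_default _ _ (by simp [somme1vAdd]; omega)]

theorem somme1v_eq (p q : List Int) :
    somme1v p q =
      if (normalize1v q).length < (normalize1v p).length then
        somme1vAdd (normalize1v p) q (normalize1v q).length
      else somme1vAdd (normalize1v q) p (normalize1v p).length := rfl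

theorem somme1v_getD (p q : List Int) (j : Nat) :
    (somme1v p q).getD j 0 = p.getD j 0 + q.getD j 0 := by
  rw [somme1v_eq]
  have hp := normalize1v_getD p
  have hq := normalize1v_getD q
  split
  · rename_i hlt
    rw [somme1vAdd_getD]
    split_ifs with h1 h2
    · rw [hp j]
    · have hq0 : q.getD j 0 = 0 := by
        rw [← hq j]; exact List.getD_eq_default _ _ (by omega)
      rw [hp j, hq0, add_zero]
    · have hp0 : p.getD j 0 = 0 := by
        rw [← hp j]; exact List.getD_eq_default _ _ (by omega)
      have hq0 : q.getD j 0 = 0 := by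
        rw [← hq j]; exact List.getD_eq_default _ _ (by omega)
      rw [hp0, hq0, add_zero]
  · rename_i hge
    rw [somme1vAdd_getD]
    split_ifs with h1 h2
    · rw [hq j, add_comm]
    · have hp0 : p.getD j 0 = 0 := by
        rw [← hp j]; exact List.getD_eq_default _ _ (by omega)
      rw [hq j, hp0, zero_add]
    · have hp0 : p.getD j 0 = 0 := by
        rw [← hp j]; exact List.getD_eq_default _ _ (by omega)
      have hq0 : q.getD j 0 = 0 := by
        rw [← hq j]; exact List.getD_eq_default _ _ (by omega)
      rw [hp0, hq0, add_zero]

theorem somme1v_ne (p q : List Int) (hp : p ≠ []) (hq : q ≠ []) : somme1v p q ≠ [] := by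
  have hp' := normalize1v_ne p hp
  have hq' := normalize1v_ne q hq
  rw [somme1v_eq]
  split <;>
    (apply List.ne_nil_of_length_pos
     rw [somme1vAdd_length]
     first
       | exact List.length_pos_of_ne_nil hp'
       | exact List.length_pos_of_ne_nil hq')

-- ===== trimRows lemmas =====
theorem dropLast_getD_rows (P : List (List Int)) (k : Nat) (h : k + 1 < P.length) :
    P.dropLast.getD k [] = P.getD k [] := by
  rw [List.getD_eq_getElem _ _ (by simp [List.length_dropLast]; omega),
      List.getD_eq_getElem _ _ (by omega), List.getElem_dropLast]

theorem getLast_getD_rows (P : List (List Int)) (h : P ≠ []) : P.getD (P.length - 1) [] = P.getLast h := by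
  rw [List.getLast_eq_getElem h, List.getD_eq_getElem _ _ (by cases P; simp at h; simp)]

theorem trimRows_coeff (P : List (List Int)) (k l : Nat) :
    ((trimRows P).getD k []).getD l 0 = (P.getD k []).getD l 0 := by
  fun_induction trimRows P with
  | case1 P h ih =>
    rw [ih]
    have hP : P ≠ [] := by rintro rfl; simp at h
    by_cases h1 : k + 1 < P.length
    · rw [dropLast_getD_rows P k h1]
    · by_cases h2 : k = P.length - 1
      · subst h2
        rw [List.getD_eq_default P.dropLast _ (by simp [List.length_dropLast])]
        rw [getLast_getD_rows P hP]
        have h0 : P.getLast hP = [0] := by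
          have hl := List.getLast?_eq_some_getLast hP
          rw [hl] at h
          exact Option.some_inj.1 h.2
        rw [h0]
        cases l <;> rfl
      · rw [List.getD_eq_default P.dropLast _ (by simp [List.length_dropLast]; omega),
            List.getD_eq_default P _ (by omega)]
  | case2 P h => rfl

theorem trimRows_ne (P : List (List Int)) (h : P ≠ []) : trimRows P ≠ [] := by
  fun_induction trimRows P with
  | case1 P hg ih =>
    refine ih ?_
    intro hnil
    have h1 : P.length ≤ 1 := by
      have := congrArg List.length hnil
      simp [List.length_dropLast] at this
      omega
    have hP : P ≠ [] := by rintro rfl; simp at hg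
    obtain ⟨a, ha⟩ : ∃ a, P = [a] := by
      cases P with
      | nil => simp at hP
      | cons x t =>
        cases t with
        | nil => exact ⟨x, rfl⟩
        | cons y u => simp at h1
    subst ha
    have := hg.2
    simp at this
    exact hg.1 (by rw [this])
  | case2 P hg => exact h

theorem trimRows_mem (P : List (List Int)) (r : List Int) (h : r ∈ trimRows P) : r ∈ P := by
  fun_induction trimRows P with
  | case1 P hg ih => exact (List.dropLast_sublist P).subset (ih h)
  | case2 P hg => exact h

theorem trimRows_stop (P : List (List Int)) :
    trimRows P = [[0]] ∨ ¬((trimRows P).getLast? = some [0]) := by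
  fun_induction trimRows P with
  | case1 P hg ih => exact ih
  | case2 P hg =>
    by_cases h1 : P = [[0]]
    · exact Or.inl h1
    · exact Or.inr (fun h2 => hg ⟨h1, h2⟩)

-- ===== padding =====
theorem pad_getD (r : List Int) (t j : Nat) : (r ++ List.replicate t 0).getD j 0 = r.getD j 0 := by
  by_cases h : j < r.length
  · rw [List.getD_eq_getElem _ _ (by simp; omega), List.getD_eq_getElem _ _ h,
        List.getElem_append_left h]
  · rw [List.getD_eq_default r _ (by omega)]
    by_cases h2 : j < r.length + t
    · rw [List.getD_eq_getElem _ _ (by simp; omega),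
          List.getElem_append_right (by omega)]
      simp
    · rw [List.getD_eq_default _ _ (by simp; omega)]

-- ===== normalize2v =====
theorem normalize2v_eq (pol : List (List Int)) :
    normalize2v pol =
      (trimRows (pol.map normalize1v)).map
        (fun r => r ++ List.replicate
          (rowMax ((trimRows (pol.map normalize1v)).headD []).length
            (trimRows (pol.map normalize1v)) - r.length) 0) := rfl

theorem map_norm_coeff (P : List (List Int)) (i j : Nat) :
    coeffB (P.map normalize1v) i j = coeffB P i j := by
  have h1 : (P.map normalize1v).getD i [] = normalize1v (P.getD i []) := by
    by_cases h : i < P.length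
    · rw [List.getD_eq_getElem (P.map normalize1v) _ (by simpa using h),
          List.getD_eq_getElem P _ h, List.getElem_map]
    · rw [List.getD_eq_default (P.map normalize1v) _ (by simpa using Nat.le_of_not_lt h),
          List.getD_eq_default P _ (Nat.le_of_not_lt h), normalize1v_nil]
  unfold coeffB
  rw [h1]
  exact normalize1v_getD _ _

theorem map_pad_coeff (P : List (List Int)) (f : List Int → Nat) (i j : Nat) :
    coeffB (P.map (fun r => r ++ List.replicate (f r) 0)) i j = coeffB P i j := by
  by_cases h : i < P.length
  · unfold coeffB
    rw [List.getD_eq_getElem (P.map (fun r => r ++ List.replicate (f r) 0)) _ (by simpa using h),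
        List.getD_eq_getElem P _ h, List.getElem_map]
    exact pad_getD _ _ _
  · unfold coeffB
    rw [List.getD_eq_default (P.map (fun r => r ++ List.replicate (f r) 0)) _
          (by simpa using Nat.le_of_not_lt h),
        List.getD_eq_default P _ (Nat.le_of_not_lt h)]

theorem normalize2v_coeff (P : List (List Int)) (i j : Nat) :
    coeffB (normalize2v P) i j = coeffB P i j := by
  rw [normalize2v_eq, map_pad_coeff]
  exact (trimRows_coeff (P.map normalize1v) i j).trans (map_norm_coeff P i j)

theorem length_eq_one_mem (r : List Int) (h : r.length = 1) : ∃ x, r = [x] := by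
  cases r with
  | nil => simp at h
  | cons a t => cases t with
    | nil => exact ⟨a, rfl⟩
    | cons b u => simp at h

theorem norm_row_last_ne (r : List Int) (hne : r ≠ [])
    (hnorm : ¬(r.getLast? = some 0 ∧ 1 < r.length)) (hr0 : r ≠ [0]) :
    r.getD (r.length - 1) 0 ≠ 0 := by
  by_cases h1 : r.length = 1
  · obtain ⟨x, rfl⟩ := length_eq_one_mem r h1
    have hx : x ≠ 0 := by rintro rfl; exact hr0 rfl
    simpa using hx
  · have h2 : 1 < r.length := by
      have := List.length_pos_of_ne_nil hne; omega
    rw [getLast_getD r hne]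
    intro hzero
    exact hnorm ⟨by rw [List.getLast?_eq_some_getLast hne, hzero], h2⟩

theorem normalize2v_canon (P : List (List Int)) (hne : P ≠ []) (hrows : ∀ r ∈ P, r ≠ []) :
    Canon (normalize2v P) := by
  rw [normalize2v_eq]
  set P1 := P.map normalize1v with hP1def
  have hP1ne : P1 ≠ [] := by simpa [hP1def] using hne
  have hP1rows : ∀ r ∈ P1, r ≠ [] := by
    intro r hr
    obtain ⟨r0, hr0, rfl⟩ := List.mem_map.1 hr
    exact normalize1v_ne r0 (hrows r0 hr0)
  have hP1norm : ∀ r ∈ P1, ¬(r.getLast? = some 0 ∧ 1 < r.length) := by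
    intro r hr
    obtain ⟨r0, _, rfl⟩ := List.mem_map.1 hr
    exact normalize1v_stop r0
  set P2 := trimRows P1 with hP2def
  have hP2ne : P2 ≠ [] := trimRows_ne P1 hP1ne
  have hP2rows : ∀ r ∈ P2, r ≠ [] := fun r hr => hP1rows r (trimRows_mem _ _ hr)
  have hP2norm : ∀ r ∈ P2, ¬(r.getLast? = some 0 ∧ 1 < r.length) :=
    fun r hr => hP1norm r (trimRows_mem _ _ hr)
  have hstop := trimRows_stop P1
  rw [← hP2def] at hstop
  set m := rowMax (P2.headD []).length P2 with hmdef
  have hhead : P2.headD [] ∈ P2 := headD_mem _ hP2ne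
  have hm1 : 1 ≤ m :=
    le_trans (List.length_pos_of_ne_nil (hP2rows _ hhead)) (rowMax_le_init _ _)
  have hlenle : ∀ r ∈ P2, r.length ≤ m := fun r hr => len_le_rowMax _ r hr _
  have hpadlen : ∀ r ∈ P2, (r ++ List.replicate (m - r.length) 0).length = m := by
    intro r hr
    have := hlenle r hr
    simp only [List.length_append, List.length_replicate]
    omega
  set R := P2.map (fun r => r ++ List.replicate (m - r.length) 0) with hRdef
  have hRlen : R.length = P2.length := by simp [hRdef]
  have hRhead : R.headD [] = (P2.headD []) ++ List.replicate (m - (P2.headD []).length) 0 := by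
    cases hc : P2 with
    | nil => exact absurd hc hP2ne
    | cons a t => simp [hRdef, hc]
  have hRheadlen : (R.headD []).length = m := by
    rw [hRhead]
    have := hlenle _ hhead
    simp only [List.length_append, List.length_replicate]
    omega
  have hRrows : ∀ r' ∈ R, r'.length = (R.headD []).length := by
    intro r' hr'
    obtain ⟨r, hr, rfl⟩ := List.mem_map.1 hr'
    rw [hRheadlen]
    exact hpadlen r hr
  have hRcoeff : ∀ i j, coeffB R i j = coeffB P2 i j := by
    intro i j
    exact map_pad_coeff P2 _ i j
  refine ⟨by rw [hRlen]; exact List.length_pos_of_ne_nil hP2ne, by omega, hRrows, ?_⟩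
  rcases hstop with hP20 | hlast
  · -- P2 = [[0]] : the result is [[0]]
    left
    have hm' : m = 1 := by rw [hmdef, hP20]; rfl
    rw [hRdef, hP20, hm']
    rfl
  · right
    set r := P2.getLast hP2ne with hrdef
    have hrmem : r ∈ P2 := List.getLast_mem hP2ne
    have hrne : r ≠ [] := hP2rows r hrmem
    have hr0 : r ≠ [0] := by
      intro h0
      exact hlast (by rw [List.getLast?_eq_some_getLast hP2ne, ← hrdef, h0])
    have hwit : r.getD (r.length - 1) 0 ≠ 0 :=
      norm_row_last_ne r hrne (hP2norm r hrmem) hr0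
    have hco : coeffB P2 (P2.length - 1) (r.length - 1) ≠ 0 := by
      unfold coeffB
      rw [getLast_getD_rows P2 hP2ne, ← hrdef]
      exact hwit
    constructor
    · exact ⟨r.length - 1, by rw [hRcoeff, hRlen]; exact hco⟩
    · rw [hRheadlen]
      by_cases hm' : m = 1
      · refine ⟨P2.length - 1, ?_⟩
        rw [hRcoeff]
        have hr1 : r.length = 1 := by
          have := hlenle r hrmem
          have := List.length_pos_of_ne_nil hrne
          omega
        have : m - 1 = r.length - 1 := by omega
        rw [this]
        exact hco
      · -- m ≥ 2 : take a row of maximal length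
        have hmax : m = rowMax 0 P2 := by
          rw [hmdef, rowMax_init_max]
          have := len_le_rowMax P2 _ hhead 0
          omega
        obtain ⟨rs, hrsmem, hrslen⟩ := rowMax_attained P2 hP2ne
        have hrslen' : rs.length = m := by omega
        obtain ⟨i, hi, hieq⟩ := List.mem_iff_getElem.1 hrsmem
        have hrs0 : rs ≠ [0] := by
          intro h0; rw [h0] at hrslen'; simp at hrslen'; omega
        have hwits : rs.getD (rs.length - 1) 0 ≠ 0 :=
          norm_row_last_ne rs (hP2rows rs hrsmem) (hP2norm rs hrsmem) hrs0
        refine ⟨i, ?_⟩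
        rw [hRcoeff]
        unfold coeffB
        rw [List.getD_eq_getElem _ _ hi, hieq, ← hrslen']
        exact hwits

theorem canon_rowsNE (P : List (List Int)) (h : Canon P) : RowsNE P := by
  obtain ⟨h1, h2, h3, _⟩ := h
  refine ⟨by rintro rfl; simp at h1, fun r hr => ?_⟩
  intro hnil
  subst hnil
  have h0 := h3 [] hr
  simp only [List.length_nil] at h0
  omega

theorem canon_rowlen (P : List (List Int)) (h : Canon P) (i : Nat) :
    (P.getD i []).length ≤ (P.headD []).length := by
  by_cases hi : i < P.length
  · exact le_of_eq (h.2.2.1 _ (by rw [List.getD_eq_getElem _ _ hi]; exact List.getElem_mem hi))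
  · rw [List.getD_eq_default _ _ (Nat.le_of_not_lt hi)]; simp

-- ===== canon uniqueness =====
theorem canon_len_le (P Q : List (List Int)) (hP : Canon P) (hQ : Canon Q)
    (h : ∀ i j, coeffB P i j = coeffB Q i j) : P.length ≤ Q.length := by
  rcases hP.2.2.2 with h0 | ⟨⟨j, hj⟩, _⟩
  · rw [h0]; simpa using hQ.1
  · by_contra hlt
    have hz := h (P.length - 1) j
    rw [coeffB_zero_of_len Q _ _ (by omega)] at hz
    exact hj hz

theorem canon_m_le (P Q : List (List Int)) (hP : Canon P) (hQ : Canon Q)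
    (h : ∀ i j, coeffB P i j = coeffB Q i j) :
    (P.headD []).length ≤ (Q.headD []).length := by
  rcases hP.2.2.2 with h0 | ⟨_, ⟨i, hi⟩⟩
  · rw [h0]
    simpa using hQ.2.1
  · by_contra hlt
    have hz := h i ((P.headD []).length - 1)
    rw [coeffB_zero_of_row Q _ _ (by
      have := canon_rowlen Q hQ i
      omega)] at hz
    exact hi hz

theorem canon_unique (P Q : List (List Int)) (hP : Canon P) (hQ : Canon Q)
    (h : ∀ i j, coeffB P i j = coeffB Q i j) : P = Q := by
  have hsymm : ∀ i j, coeffB Q i j = coeffB P i j := fun i j => (h i j).symm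
  have hlen : P.length = Q.length :=
    le_antisymm (canon_len_le P Q hP hQ h) (canon_len_le Q P hQ hP hsymm)
  have hm : (P.headD []).length = (Q.headD []).length :=
    le_antisymm (canon_m_le P Q hP hQ h) (canon_m_le Q P hQ hP hsymm)
  apply List.ext_getElem hlen
  intro i h1 h2
  have hrowlen : (P[i]).length = (Q[i]).length := by
    rw [hP.2.2.1 _ (List.getElem_mem h1), hQ.2.2.1 _ (List.getElem_mem h2), hm]
  apply List.ext_getElem hrowlen
  intro j hj1 hj2
  have e1 : coeffB P i j = P[i][j] := by
    unfold coeffB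
    rw [List.getD_eq_getElem _ _ h1, List.getD_eq_getElem _ _ hj1]
  have e2 : coeffB Q i j = Q[i][j] := by
    unfold coeffB
    rw [List.getD_eq_getElem _ _ h2, List.getD_eq_getElem _ _ hj2]
  rw [← e1, ← e2]
  exact h i j

-- ===== B-side canonicalization agrees with A's =====
theorem trimLen_step (r : List Int) (k : Nat) (h : 1 < k ∧ r.getD (k - 1) 0 = 0) :
    trimLen r k = trimLen r (k - 1) := by
  conv_lhs => rw [trimLen]
  rw [dif_pos h]

theorem trimLen_eq_of_stop (r : List Int) (k : Nat) (h : ¬(1 < k ∧ r.getD (k - 1) 0 = 0)) :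
    trimLen r k = k := by
  conv_lhs => rw [trimLen]
  rw [dif_neg h]

theorem trimLen_le (r : List Int) (k : Nat) : trimLen r k ≤ k := by
  fun_induction trimLen r k with
  | case1 k h ih => omega
  | case2 k h => exact le_refl _

theorem trimLen_dropLast (r : List Int) : ∀ k, k + 1 ≤ r.length → trimLen r k = trimLen r.dropLast k := by
  intro k
  induction k using Nat.strong_induction_on with
  | _ k ih =>
    intro hk
    by_cases h : 1 < k ∧ r.getD (k - 1) 0 = 0
    · have h' : 1 < k ∧ r.dropLast.getD (k - 1) 0 = 0 :=
        ⟨h.1, by rw [dropLast_getD r (k - 1) (by omega)]; exact h.2⟩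
      rw [trimLen_step r k h, trimLen_step r.dropLast k h', ih (k - 1) (by omega) (by omega)]
    · have h' : ¬(1 < k ∧ r.dropLast.getD (k - 1) 0 = 0) := by
        intro hc
        exact h ⟨hc.1, by rw [← dropLast_getD r (k - 1) (by omega)]; exact hc.2⟩
      rw [trimLen_eq_of_stop r k h, trimLen_eq_of_stop r.dropLast k h']

theorem take_dropLast_eq {α : Type} (s : List α) (t : Nat) (h : t ≤ s.length - 1) :
    s.dropLast.take t = s.take t := by
  rw [List.dropLast_eq_take, List.take_take, Nat.min_eq_left h]

theorem trimB_eq (r : List Int) : trimB r = normalize1v r := by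
  fun_induction normalize1v r with
  | case1 s h ih =>
    have hs : s ≠ [] := by rintro rfl; simp at h
    have hlen : 1 < s.length := h.2
    have hlast : s.getD (s.length - 1) 0 = 0 := by
      rw [getLast_getD s hs]
      have hl := List.getLast?_eq_some_getLast hs
      rw [hl] at h
      exact Option.some_inj.1 h.1
    have e1 : trimLen s s.length = trimLen s.dropLast (s.length - 1) := by
      rw [trimLen_step s _ ⟨hlen, hlast⟩, trimLen_dropLast s (s.length - 1) (by omega)]
    have e2 : trimB s = trimB s.dropLast := by
      unfold trimB
      rw [e1, List.length_dropLast]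
      have ht : trimLen s.dropLast (s.length - 1) ≤ s.length - 1 := by
        have := trimLen_le s.dropLast (s.length - 1)
        omega
      exact (take_dropLast_eq s _ ht).symm
    rw [e2, ih]
  | case2 s h =>
    have hng : ¬(1 < s.length ∧ s.getD (s.length - 1) 0 = 0) := by
      intro hc
      have hnil : s ≠ [] := by rintro rfl; simp at hc
      apply h
      refine ⟨?_, hc.1⟩
      rw [List.getLast?_eq_some_getLast hnil, ← getLast_getD s hnil, hc.2]
    unfold trimB
    rw [trimLen_eq_of_stop s _ hng, List.take_length]

theorem lastRowCount_step (p : List (List Int)) (d : Nat) (h : 1 < d ∧ p.getD (d - 1) [] = [0]) :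
    lastRowCount p d = lastRowCount p (d - 1) := by
  conv_lhs => rw [lastRowCount]
  rw [dif_pos h]

theorem lastRowCount_eq_of_stop (p : List (List Int)) (d : Nat) (h : ¬(1 < d ∧ p.getD (d - 1) [] = [0])) :
    lastRowCount p d = d := by
  conv_lhs => rw [lastRowCount]
  rw [dif_neg h]

theorem lastRowCount_le (p : List (List Int)) (d : Nat) : lastRowCount p d ≤ d := by
  fun_induction lastRowCount p d with
  | case1 d h ih => omega
  | case2 d h => exact le_refl _

theorem lastRowCount_dropLast (p : List (List Int)) : ∀ d, d + 1 ≤ p.length →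
    lastRowCount p d = lastRowCount p.dropLast d := by
  intro d
  induction d using Nat.strong_induction_on with
  | _ d ih =>
    intro hd
    by_cases h : 1 < d ∧ p.getD (d - 1) [] = [0]
    · have h' : 1 < d ∧ p.dropLast.getD (d - 1) [] = [0] :=
        ⟨h.1, by rw [dropLast_getD_rows p (d - 1) (by omega)]; exact h.2⟩
      rw [lastRowCount_step p d h, lastRowCount_step p.dropLast d h', ih (d - 1) (by omega) (by omega)]
    · have h' : ¬(1 < d ∧ p.dropLast.getD (d - 1) [] = [0]) := by
        intro hc
        exact h ⟨hc.1, by rw [← dropLast_getD_rows p (d - 1) (by omega)]; exact hc.2⟩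
      rw [lastRowCount_eq_of_stop p d h, lastRowCount_eq_of_stop p.dropLast d h']

theorem take_lastRowCount_eq (p : List (List Int)) : p.take (lastRowCount p p.length) = trimRows p := by
  fun_induction trimRows p with
  | case1 P h ih =>
    have hP : P ≠ [] := by rintro rfl; simp at h
    have hlen : 1 < P.length := by
      rcases Nat.lt_or_ge 1 P.length with h' | h'
      · exact h'
      · exfalso
        have h1 : P.length = 1 := by
          have := List.length_pos_of_ne_nil hP; omega
        obtain ⟨a, ha⟩ := List.length_eq_one_iff.1 h1
        subst ha
        have h2 := h.2
        simp at h2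
        exact h.1 (by rw [h2])
    have hlast : P.getD (P.length - 1) [] = [0] := by
      rw [getLast_getD_rows P hP]
      have hl := List.getLast?_eq_some_getLast hP
      rw [hl] at h
      exact Option.some_inj.1 h.2
    have e1 : lastRowCount P P.length = lastRowCount P.dropLast (P.length - 1) := by
      rw [lastRowCount_step P _ ⟨hlen, hlast⟩, lastRowCount_dropLast P (P.length - 1) (by omega)]
    have e2 : P.take (lastRowCount P P.length) = P.dropLast.take (lastRowCount P.dropLast P.dropLast.length) := by
      rw [e1, List.length_dropLast]
      have ht : lastRowCount P.dropLast (P.length - 1) ≤ P.length - 1 := by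
        have := lastRowCount_le P.dropLast (P.length - 1)
        omega
      exact (take_dropLast_eq P _ ht).symm
    rw [e2, ih]
  | case2 P h =>
    have hng : ¬(1 < P.length ∧ P.getD (P.length - 1) [] = [0]) := by
      intro hc
      have hnil : P ≠ [] := by rintro rfl; simp at hc
      apply h
      constructor
      · intro h0
        rw [h0] at hc
        simp at hc
      · rw [List.getLast?_eq_some_getLast hnil, ← getLast_getD_rows P hnil, hc.2]
    rw [lastRowCount_eq_of_stop P _ hng, List.take_length]

theorem canonB_expand (g : List (List Int)) :
    canonB g =
      ((g.map trimB).take (lastRowCount (g.map trimB) (g.map trimB).length)).map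
        (fun r => r ++ List.replicate
          (rowMax 0 ((g.map trimB).take (lastRowCount (g.map trimB) (g.map trimB).length)) - r.length) 0) := rfl

theorem canonB_eq (g : List (List Int)) : canonB g = normalize2v g := by
  rw [canonB_expand, normalize2v_eq]
  have hmap : g.map trimB = g.map normalize1v := List.map_congr_left (fun r _ => trimB_eq r)
  rw [hmap, take_lastRowCount_eq]
  by_cases hc : trimRows (g.map normalize1v) = []
  · rw [hc]; rfl
  · congr 1
    have hle := len_le_rowMax (trimRows (g.map normalize1v)) _ (headD_mem _ hc) 0
    rw [rowMax_init_max (trimRows (g.map normalize1v)) ((trimRows (g.map normalize1v)).headD []).length,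
        Nat.max_eq_right hle]

-- ===== somme2v =====
theorem getD_len_le_rowMax (P : List (List Int)) (i : Nat) : (P.getD i []).length ≤ rowMax 0 P := by
  by_cases h : i < P.length
  · rw [List.getD_eq_getElem P _ h]
    exact len_le_rowMax P _ (List.getElem_mem h) 0
  · rw [List.getD_eq_default P _ (Nat.le_of_not_lt h)]
    simp

theorem zipdrop_coeff_left (p q : List (List Int)) (h : q.length ≤ p.length) (k l : Nat) :
    coeffB (List.zipWith somme1v p q ++ p.drop q.length) k l = coeffB p k l + coeffB q k l := by
  have hzl : (List.zipWith somme1v p q).length = q.length := by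
    rw [List.length_zipWith]; omega
  by_cases h1 : k < q.length
  · unfold coeffB
    rw [List.getD_eq_getElem (List.zipWith somme1v p q ++ p.drop q.length) _
          (by rw [List.length_append, hzl, List.length_drop]; omega),
        List.getElem_append_left (by omega), List.getElem_zipWith,
        somme1v_getD, List.getD_eq_getElem p _ (by omega), List.getD_eq_getElem q _ h1]
  · by_cases h2 : k < p.length
    · unfold coeffB
      rw [List.getD_eq_getElem (List.zipWith somme1v p q ++ p.drop q.length) _
            (by rw [List.length_append, hzl, List.length_drop]; omega),
          List.getElem_append_right (by omega)]
      have : (p.drop q.length)[k - (List.zipWith somme1v p q).length]'(by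
          simp [List.length_drop, hzl]; omega) = p[k]'h2 := by
        rw [List.getElem_drop]
        congr 1
        omega
      rw [this, List.getD_eq_getElem p _ h2,
          List.getD_eq_default q _ (by omega)]
      simp
    · unfold coeffB
      rw [List.getD_eq_default (List.zipWith somme1v p q ++ p.drop q.length) _
            (by rw [List.length_append, hzl, List.length_drop]; omega),
          List.getD_eq_default p _ (by omega), List.getD_eq_default q _ (by omega)]
      simp

theorem zipdrop_coeff_right (p q : List (List Int)) (h : p.length ≤ q.length) (k l : Nat) :
    coeffB (List.zipWith somme1v p q ++ q.drop p.length) k l = coeffB p k l + coeffB q k l := by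
  have hzl : (List.zipWith somme1v p q).length = p.length := by
    rw [List.length_zipWith]; omega
  by_cases h1 : k < p.length
  · unfold coeffB
    rw [List.getD_eq_getElem (List.zipWith somme1v p q ++ q.drop p.length) _
          (by rw [List.length_append, hzl, List.length_drop]; omega),
        List.getElem_append_left (by omega), List.getElem_zipWith,
        somme1v_getD, List.getD_eq_getElem p _ h1, List.getD_eq_getElem q _ (by omega)]
  · by_cases h2 : k < q.length
    · unfold coeffB
      rw [List.getD_eq_getElem (List.zipWith somme1v p q ++ q.drop p.length) _
            (by rw [List.length_append, hzl, List.length_drop]; omega),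
          List.getElem_append_right (by omega)]
      have : (q.drop p.length)[k - (List.zipWith somme1v p q).length]'(by
          simp [List.length_drop, hzl]; omega) = q[k]'h2 := by
        rw [List.getElem_drop]
        congr 1
        omega
      rw [this, List.getD_eq_getElem q _ h2,
          List.getD_eq_default p _ (by omega)]
      simp
    · unfold coeffB
      rw [List.getD_eq_default (List.zipWith somme1v p q ++ q.drop p.length) _
            (by rw [List.length_append, hzl, List.length_drop]; omega),
          List.getD_eq_default p _ (by omega), List.getD_eq_default q _ (by omega)]
      simp

theorem zipdrop_rowsNE_right (p q : List (List Int)) (hp : RowsNE p) (hq : RowsNE q)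
    (h : p.length ≤ q.length) : RowsNE (List.zipWith somme1v p q ++ q.drop p.length) := by
  constructor
  · apply List.ne_nil_of_length_pos
    have := List.length_pos_of_ne_nil hq.1
    rw [List.length_append, List.length_zipWith, List.length_drop]
    omega
  · intro r hr
    rcases List.mem_append.1 hr with hm | hm
    · obtain ⟨i, hi, heq⟩ := List.mem_iff_getElem.1 hm
      rw [List.getElem_zipWith] at heq
      rw [← heq]
      have hil : i < p.length := by
        have := hi; rw [List.length_zipWith] at this; omega
      have hiq : i < q.length := by omega
      exact somme1v_ne _ _ (hp.2 _ (List.getElem_mem hil)) (hq.2 _ (List.getElem_mem hiq))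
    · exact hq.2 r (List.mem_of_mem_drop hm)

theorem zipdrop_rowsNE_left (p q : List (List Int)) (hp : RowsNE p) (hq : RowsNE q)
    (h : q.length ≤ p.length) : RowsNE (List.zipWith somme1v p q ++ p.drop q.length) := by
  constructor
  · apply List.ne_nil_of_length_pos
    have := List.length_pos_of_ne_nil hp.1
    rw [List.length_append, List.length_zipWith, List.length_drop]
    omega
  · intro r hr
    rcases List.mem_append.1 hr with hm | hm
    · obtain ⟨i, hi, heq⟩ := List.mem_iff_getElem.1 hm
      rw [List.getElem_zipWith] at heq
      rw [← heq]
      have hil : i < q.length := by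
        have := hi; rw [List.length_zipWith] at this; omega
      have hipp : i < p.length := by omega
      exact somme1v_ne _ _ (hp.2 _ (List.getElem_mem hipp)) (hq.2 _ (List.getElem_mem hil))
    · exact hp.2 r (List.mem_of_mem_drop hm)

theorem somme2v_spec (p q : List (List Int)) (hp : RowsNE p) (hq : RowsNE q) :
    Canon (somme2v p q) ∧ ∀ k l, coeffB (somme2v p q) k l = coeffB p k l + coeffB q k l := by
  unfold somme2v
  split
  · rename_i hlt
    have hR := zipdrop_rowsNE_right p q hp hq (by omega)
    exact ⟨normalize2v_canon _ hR.1 hR.2,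
      fun k l => (normalize2v_coeff _ k l).trans (zipdrop_coeff_right p q (by omega) k l)⟩
  · rename_i hge
    have hR := zipdrop_rowsNE_left p q hp hq (by omega)
    exact ⟨normalize2v_canon _ hR.1 hR.2,
      fun k l => (normalize2v_coeff _ k l).trans (zipdrop_coeff_left p q (by omega) k l)⟩

-- ===== generic getD helpers =====
theorem getD_append_left' {α : Type} (a b : List α) (d : α) (k : Nat) (h : k < a.length) :
    (a ++ b).getD k d = a.getD k d := by
  rw [List.getD_eq_getElem (a ++ b) _ (by rw [List.length_append]; omega),
      List.getD_eq_getElem a _ h, List.getElem_append_left h]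

theorem getD_append_right' {α : Type} (a b : List α) (d : α) (k : Nat) (h : a.length ≤ k) :
    (a ++ b).getD k d = b.getD (k - a.length) d := by
  by_cases h2 : k - a.length < b.length
  · rw [List.getD_eq_getElem (a ++ b) _ (by rw [List.length_append]; omega),
        List.getD_eq_getElem b _ h2, List.getElem_append_right h]
  · rw [List.getD_eq_default (a ++ b) _ (by rw [List.length_append]; omega),
        List.getD_eq_default b _ (by omega)]

theorem getD_replicate' {α : Type} (x d : α) (n k : Nat) :
    (List.replicate n x).getD k d = if k < n then x else d := by
  by_cases h : k < n
  · rw [if_pos h, List.getD_eq_getElem _ _ (by rw [List.length_replicate]; omega),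
        List.getElem_replicate]
  · rw [if_neg h, List.getD_eq_default _ _ (by rw [List.length_replicate]; omega)]

-- ===== mult_scal2v =====
theorem mult_scal2v_coeff (pol : List (List Int)) (x : Int) (k l : Nat) :
    coeffB (mult_scal2v pol x) k l = coeffB pol k l * x := by
  unfold mult_scal2v
  have step : coeffB ((normalize2v pol).map (fun r => r.map (fun a => a * x))) k l
      = coeffB (normalize2v pol) k l * x := by
    set S := normalize2v pol with hS
    by_cases h : k < S.length
    · unfold coeffB
      rw [List.getD_eq_getElem (S.map (fun r => r.map (fun a => a * x))) _ (by simpa using h),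
          List.getElem_map, List.getD_eq_getElem S _ h]
      by_cases hl : l < (S[k]).length
      · rw [List.getD_eq_getElem ((S[k]).map (fun a => a * x)) _ (by simpa using hl),
            List.getElem_map, List.getD_eq_getElem _ _ hl]
      · rw [List.getD_eq_default ((S[k]).map (fun a => a * x)) _ (by simpa using Nat.le_of_not_lt hl),
            List.getD_eq_default _ _ (Nat.le_of_not_lt hl), zero_mul]
    · unfold coeffB
      rw [List.getD_eq_default (S.map (fun r => r.map (fun a => a * x))) _
            (by simpa using Nat.le_of_not_lt h),
          List.getD_eq_default S _ (Nat.le_of_not_lt h)]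
      simp
  rw [step, normalize2v_coeff]

theorem mult_scal2v_rowsNE (pol : List (List Int)) (x : Int) (hp : RowsNE pol) :
    RowsNE (mult_scal2v pol x) := by
  have hC := canon_rowsNE _ (normalize2v_canon pol hp.1 hp.2)
  unfold mult_scal2v
  refine ⟨by simpa using hC.1, ?_⟩
  intro r hr
  obtain ⟨r0, hr0, rfl⟩ := List.mem_map.1 hr
  simpa using hC.2 r0 hr0

-- ===== mult_monom2v =====
theorem mult_monom2v_eq (pol : List (List Int)) (x : Int) (i j : Nat) :
    mult_monom2v pol x i j =
      List.replicate i (List.replicate (((mult_scal2v pol x).headD []).length + j) 0)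
        ++ (mult_scal2v pol x).map (fun r => List.replicate j 0 ++ r) := rfl

theorem mult_monom2v_coeff (pol : List (List Int)) (x : Int) (i j k l : Nat) :
    coeffB (mult_monom2v pol x i j) k l =
      if i ≤ k ∧ j ≤ l then coeffB pol (k - i) (l - j) * x else 0 := by
  rw [mult_monom2v_eq]
  have hrep : ∀ (t l' : Nat), (List.replicate t (0:Int)).getD l' 0 = 0 := by
    intro t l'
    rw [getD_replicate']
    split <;> rfl
  by_cases hk : k < i
  · rw [if_neg (by omega)]
    unfold coeffB
    rw [getD_append_left' _ _ _ _ (by rw [List.length_replicate]; omega),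
        getD_replicate', if_pos hk]
    exact hrep _ l
  · unfold coeffB
    rw [getD_append_right' _ _ _ _ (by rw [List.length_replicate]; omega)]
    simp only [List.length_replicate]
    by_cases hk2 : k - i < (mult_scal2v pol x).length
    · have hrow : ((mult_scal2v pol x).map (fun r => List.replicate j 0 ++ r)).getD (k - i) []
          = List.replicate j 0 ++ (mult_scal2v pol x).getD (k - i) [] := by
        rw [List.getD_eq_getElem ((mult_scal2v pol x).map (fun r => List.replicate j 0 ++ r)) _
              (by simpa using hk2),
            List.getElem_map, List.getD_eq_getElem (mult_scal2v pol x) _ hk2]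
      rw [hrow]
      by_cases hl : l < j
      · rw [if_neg (by omega)]
        rw [getD_append_left' _ _ _ _ (by rw [List.length_replicate]; omega)]
        exact hrep _ l
      · rw [if_pos ⟨by omega, by omega⟩,
            getD_append_right' _ _ _ _ (by rw [List.length_replicate]; omega)]
        simp only [List.length_replicate]
        exact mult_scal2v_coeff pol x (k - i) (l - j)
    · rw [List.getD_eq_default ((mult_scal2v pol x).map (fun r => List.replicate j 0 ++ r)) _
            (by simpa using Nat.le_of_not_lt hk2)]
      split
      · show ([] : List Int).getD l 0 = coeffB pol (k - i) (l - j) * x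
        rw [← mult_scal2v_coeff pol x (k - i) (l - j),
            coeffB_zero_of_len _ _ _ (by omega)]
        rfl
      · rfl

theorem mult_monom2v_rowsNE (pol : List (List Int)) (x : Int) (i j : Nat) (hp : RowsNE pol) :
    RowsNE (mult_monom2v pol x i j) := by
  have hsc := mult_scal2v_rowsNE pol x hp
  have hm1 : 1 ≤ ((mult_scal2v pol x).headD []).length :=
    List.length_pos_of_ne_nil (hsc.2 _ (headD_mem _ hsc.1))
  rw [mult_monom2v_eq]
  constructor
  · apply List.ne_nil_of_length_pos
    rw [List.length_append, List.length_replicate, List.length_map]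
    have := List.length_pos_of_ne_nil hsc.1
    omega
  · intro r hr
    rcases List.mem_append.1 hr with hm | hm
    · rw [List.eq_of_mem_replicate hm]
      apply List.ne_nil_of_length_pos
      rw [List.length_replicate]
      omega
    · obtain ⟨r0, hr0, rfl⟩ := List.mem_map.1 hm
      intro hnil
      rw [List.append_eq_nil_iff] at hnil
      exact hsc.2 r0 hr0 hnil.2

theorem canon_single : Canon [[0]] := by
  refine ⟨by simp, by simp, ?_, Or.inl rfl⟩
  intro r hr
  simp at hr
  rw [hr]
  rfl

-- ===== the accumulation loop of mult2v =====
def stepA (s1 s2 : List (List Int)) (f : List (List Int)) (p : Nat × Nat) : List (List Int) :=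
  somme2v f (mult_monom2v s2 ((s1.getD p.1 []).getD p.2 0) p.1 p.2)

theorem loop_spec (s1 s2 : List (List Int)) (h2 : RowsNE s2) (ps : List (Nat × Nat)) :
    Canon (ps.foldl (stepA s1 s2) [[0]]) ∧
    ∀ k l, coeffB (ps.foldl (stepA s1 s2) [[0]]) k l =
      (ps.map (fun p => if p.1 ≤ k ∧ p.2 ≤ l then
        coeffB s2 (k - p.1) (l - p.2) * coeffB s1 p.1 p.2 else 0)).sum := by
  induction ps using List.reverseRecOn with
  | nil =>
    refine ⟨canon_single, fun k l => ?_⟩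
    simp [coeffB_single_zero]
  | append_singleton ps p ih =>
    rw [List.foldl_append]
    simp only [List.foldl_cons, List.foldl_nil]
    have hfR := canon_rowsNE _ ih.1
    have hmon := mult_monom2v_rowsNE s2 ((s1.getD p.1 []).getD p.2 0) p.1 p.2 h2
    have hs := somme2v_spec _ _ hfR hmon
    refine ⟨hs.1, fun k l => ?_⟩
    rw [show stepA s1 s2 (ps.foldl (stepA s1 s2) [[0]]) p
          = somme2v (ps.foldl (stepA s1 s2) [[0]])
              (mult_monom2v s2 ((s1.getD p.1 []).getD p.2 0) p.1 p.2) from rfl,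
        hs.2 k l, ih.2 k l, mult_monom2v_coeff, List.map_append, List.sum_append]
    simp only [List.map_cons, List.map_nil, List.sum_cons, List.sum_nil, add_zero]
    rfl

theorem mult2v_eq (pol1 pol2 : List (List Int)) :
    mult2v pol1 pol2 =
      ((List.range (normalize2v pol1).length).flatMap (fun i =>
        (List.range ((normalize2v pol1).headD []).length).map (fun j => (i, j)))).foldl
        (stepA (normalize2v pol1) (normalize2v pol2)) [[0]] := by
  rw [List.foldl_flatMap]
  simp only [List.foldl_map]
  rfl

-- ===== list-sum bookkeeping =====
theorem sum_flatMap_int {α : Type} (L : List α) (F : α → List Int) :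
    (L.flatMap F).sum = (L.map (fun a => (F a).sum)).sum := by
  induction L with
  | nil => rfl
  | cons a t ih => simp [List.flatMap_cons, List.sum_append, ih]

theorem sum_range_shrink (f : Nat → Int) (n N : Nat) (hn : n ≤ N)
    (h : ∀ i, n ≤ i → i < N → f i = 0) :
    ((List.range N).map f).sum = ((List.range n).map f).sum := by
  have hsplit : List.range N = List.range n ++ List.range' n (N - n) := by
    rw [List.range_eq_range', List.range_eq_range']
    have e := List.range'_append_1 (s := 0) (m := n) (n := N - n)
    simp only [Nat.zero_add] at e
    rw [e, Nat.add_sub_cancel' hn]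
  rw [hsplit, List.map_append, List.sum_append]
  have hz : ((List.range' n (N - n)).map f).sum = 0 := by
    apply List.sum_eq_zero
    intro x hx
    obtain ⟨i, hi, rfl⟩ := List.mem_map.1 hx
    rw [List.mem_range'_1] at hi
    exact h i hi.1 (by omega)
  rw [hz, add_zero]

theorem sum_range_bridge (f : Nat → Int) (n n' : Nat)
    (hzn : ∀ i, n ≤ i → f i = 0) (hzn' : ∀ i, n' ≤ i → f i = 0) :
    ((List.range n).map f).sum = ((List.range n').map f).sum := by
  rcases Nat.le_total n n' with h | h
  · exact (sum_range_shrink f n n' h (fun i hi _ => hzn i hi)).symm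
  · exact sum_range_shrink f n' n h (fun i hi _ => hzn' i hi)

theorem sum_window (f : Nat → Int) (a b N : Nat) (hbN : b ≤ N)
    (h1 : ∀ i, i < a → f i = 0) (h2 : ∀ i, b ≤ i → i < N → f i = 0) :
    ((List.range' a (b - a)).map f).sum = ((List.range N).map f).sum := by
  by_cases hab : a ≤ b
  · have e1 : List.range' 0 a ++ List.range' a (b - a) = List.range' 0 b := by
      have e := List.range'_append_1 (s := 0) (m := a) (n := b - a)
      simp only [Nat.zero_add] at e
      rw [e, Nat.add_sub_cancel' hab]
    have e2 : List.range' 0 b ++ List.range' b (N - b) = List.range' 0 N := by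
      have e := List.range'_append_1 (s := 0) (m := b) (n := N - b)
      simp only [Nat.zero_add] at e
      rw [e, Nat.add_sub_cancel' hbN]
    have hsplit : List.range N = (List.range' 0 a ++ List.range' a (b - a)) ++ List.range' b (N - b) := by
      rw [List.range_eq_range', e1, e2]
    rw [hsplit, List.map_append, List.map_append, List.sum_append, List.sum_append]
    have z1 : ((List.range' 0 a).map f).sum = 0 := by
      apply List.sum_eq_zero
      intro x hx
      obtain ⟨i, hi, rfl⟩ := List.mem_map.1 hx
      rw [List.mem_range'_1] at hi
      exact h1 i (by omega)
    have z3 : ((List.range' b (N - b)).map f).sum = 0 := by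
      apply List.sum_eq_zero
      intro x hx
      obtain ⟨i, hi, rfl⟩ := List.mem_map.1 hx
      rw [List.mem_range'_1] at hi
      exact h2 i hi.1 (by omega)
    rw [z1, z3, zero_add, add_zero]
  · have hba : b - a = 0 := by omega
    rw [hba]
    simp only [List.range'_zero, List.map_nil, List.sum_nil]
    symm
    apply List.sum_eq_zero
    intro x hx
    obtain ⟨i, hi, rfl⟩ := List.mem_map.1 hx
    rw [List.mem_range] at hi
    by_cases hia : i < a
    · exact h1 i hia
    · exact h2 i (by omega) hi

-- ===== A-side coefficient formula =====
theorem multA_spec (pol1 pol2 : List (List Int)) (h1 : RowsNE pol1) (h2 : RowsNE pol2) :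
    Canon (mult2v pol1 pol2) ∧ ∀ k l, coeffB (mult2v pol1 pol2) k l = Fsum pol1 pol2 k l := by
  have hc1 : Canon (normalize2v pol1) := normalize2v_canon _ h1.1 h1.2
  have hc2 : Canon (normalize2v pol2) := normalize2v_canon _ h2.1 h2.2
  rw [mult2v_eq]
  have hl := loop_spec (normalize2v pol1) (normalize2v pol2) (canon_rowsNE _ hc2)
      ((List.range (normalize2v pol1).length).flatMap (fun i =>
        (List.range ((normalize2v pol1).headD []).length).map (fun j => (i, j))))
  refine ⟨hl.1, fun k l => ?_⟩
  rw [hl.2 k l]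
  -- zero facts for the normalized s1
  have z1 : ∀ i j, ((normalize2v pol1).headD []).length ≤ j → coeffB (normalize2v pol1) i j = 0 := by
    intro i j hj
    exact coeffB_zero_of_row _ _ _ (le_trans (canon_rowlen _ hc1 i) hj)
  have z2 : ∀ i j, (normalize2v pol1).length ≤ i → coeffB (normalize2v pol1) i j = 0 := by
    intro i j hi
    exact coeffB_zero_of_len _ _ _ hi
  -- flatten the pair list into nested sums
  rw [List.map_flatMap, sum_flatMap_int]
  simp only [List.map_map]
  -- inner conversion for each i, then outer
  have hinner : ∀ i,
      ((List.range ((normalize2v pol1).headD []).length).map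
        (fun j => if i ≤ k ∧ j ≤ l then
          coeffB (normalize2v pol2) (k - i) (l - j) * coeffB (normalize2v pol1) i j else 0)).sum
      = ((List.range (l+1)).map
        (fun j => if i ≤ k ∧ j ≤ l then
          coeffB (normalize2v pol2) (k - i) (l - j) * coeffB (normalize2v pol1) i j else 0)).sum := by
    intro i
    apply sum_range_bridge
    · intro j hj
      rw [z1 i j hj, mul_zero]
      split <;> rfl
    · intro j hj
      rw [if_neg (by omega)]
  have houter :
      ((List.range (normalize2v pol1).length).map (fun i =>
        ((List.range (l+1)).map
          (fun j => if i ≤ k ∧ j ≤ l then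
            coeffB (normalize2v pol2) (k - i) (l - j) * coeffB (normalize2v pol1) i j else 0)).sum)).sum
      = ((List.range (k+1)).map (fun i =>
        ((List.range (l+1)).map
          (fun j => if i ≤ k ∧ j ≤ l then
            coeffB (normalize2v pol2) (k - i) (l - j) * coeffB (normalize2v pol1) i j else 0)).sum)).sum := by
    apply sum_range_bridge
    · intro i hi
      apply List.sum_eq_zero
      intro x hx
      obtain ⟨j, _, rfl⟩ := List.mem_map.1 hx
      rw [z2 i j hi, mul_zero]
      split <;> rfl
    · intro i hi
      apply List.sum_eq_zero
      intro x hx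
      obtain ⟨j, _, rfl⟩ := List.mem_map.1 hx
      rw [if_neg (by omega)]
  calc ((List.range (normalize2v pol1).length).map (fun i =>
          ((List.range ((normalize2v pol1).headD []).length).map
            (fun j => if i ≤ k ∧ j ≤ l then
              coeffB (normalize2v pol2) (k - i) (l - j) * coeffB (normalize2v pol1) i j else 0)).sum)).sum
      = ((List.range (normalize2v pol1).length).map (fun i =>
          ((List.range (l+1)).map
            (fun j => if i ≤ k ∧ j ≤ l then
              coeffB (normalize2v pol2) (k - i) (l - j) * coeffB (normalize2v pol1) i j else 0)).sum)).sum := by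
        apply congrArg
        exact List.map_congr_left (fun i _ => hinner i)
    _ = ((List.range (k+1)).map (fun i =>
          ((List.range (l+1)).map
            (fun j => if i ≤ k ∧ j ≤ l then
              coeffB (normalize2v pol2) (k - i) (l - j) * coeffB (normalize2v pol1) i j else 0)).sum)).sum := houter
    _ = Fsum pol1 pol2 k l := by
        unfold Fsum
        apply congrArg
        apply List.map_congr_left
        intro i hi
        rw [List.mem_range] at hi
        apply congrArg
        apply List.map_congr_left
        intro j hj
        rw [List.mem_range] at hj
        rw [if_pos ⟨by omega, by omega⟩, normalize2v_coeff, normalize2v_coeff, mul_comm]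

-- ===== B-side coefficient formula =====
def entryB (pol1 pol2 : List (List Int)) (k l : Nat) : Int :=
  ((List.range' ((k+1) - pol2.length) (min (k+1) pol1.length - ((k+1) - pol2.length))).map (fun i =>
    ((List.range' ((l+1) - rowMax 0 pol2)
        (min (l+1) (pol1.getD i []).length - ((l+1) - rowMax 0 pol2))).map (fun j =>
      coeffB pol1 i j * coeffB pol2 (k - i) (l - j))).sum)).sum

def gridB (pol1 pol2 : List (List Int)) : List (List Int) :=
  (List.range (pol1.length + pol2.length - 1)).map (fun k =>
    (List.range (rowMax 0 pol1 + rowMax 0 pol2 - 1)).map (entryB pol1 pol2 k))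

theorem mult2v_alt_eq (pol1 pol2 : List (List Int)) :
    mult2v_alt pol1 pol2 = canonB (gridB pol1 pol2) := rfl

theorem coeffB_zero_of_rowMax (P : List (List Int)) (i j : Nat) (h : rowMax 0 P ≤ j) :
    coeffB P i j = 0 :=
  coeffB_zero_of_row P i j (le_trans (getD_len_le_rowMax P i) h)

theorem Fsum_zero_k (pol1 pol2 : List (List Int)) (h1 : pol1 ≠ []) (k l : Nat)
    (hk : pol1.length + pol2.length - 1 ≤ k) : Fsum pol1 pol2 k l = 0 := by
  have hn1 := List.length_pos_of_ne_nil h1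
  apply List.sum_eq_zero
  intro x hx
  obtain ⟨i, hi, rfl⟩ := List.mem_map.1 hx
  rw [List.mem_range] at hi
  apply List.sum_eq_zero
  intro y hy
  obtain ⟨j, hj, rfl⟩ := List.mem_map.1 hy
  by_cases hin : i < pol1.length
  · rw [coeffB_zero_of_len pol2 _ _ (by omega), mul_zero]
  · rw [coeffB_zero_of_len pol1 _ _ (by omega), zero_mul]

theorem Fsum_zero_l (pol1 pol2 : List (List Int)) (hm1 : 1 ≤ rowMax 0 pol1) (k l : Nat)
    (hl : rowMax 0 pol1 + rowMax 0 pol2 - 1 ≤ l) : Fsum pol1 pol2 k l = 0 := by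
  apply List.sum_eq_zero
  intro x hx
  obtain ⟨i, hi, rfl⟩ := List.mem_map.1 hx
  apply List.sum_eq_zero
  intro y hy
  obtain ⟨j, hj, rfl⟩ := List.mem_map.1 hy
  by_cases hrow : (pol1.getD i []).length ≤ j
  · rw [coeffB_zero_of_row pol1 _ _ hrow, zero_mul]
  · have hjm : j < rowMax 0 pol1 :=
      Nat.lt_of_lt_of_le (Nat.lt_of_not_le hrow) (getD_len_le_rowMax pol1 i)
    rw [coeffB_zero_of_rowMax pol2 _ _ (by omega), mul_zero]

theorem multB_spec (pol1 pol2 : List (List Int)) (h1 : RowsNE pol1) (h2 : RowsNE pol2) :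
    Canon (mult2v_alt pol1 pol2) ∧ ∀ k l, coeffB (mult2v_alt pol1 pol2) k l = Fsum pol1 pol2 k l := by
  have hm1 : 1 ≤ rowMax 0 pol1 :=
    le_trans (List.length_pos_of_ne_nil (h1.2 _ (headD_mem _ h1.1)))
      (len_le_rowMax pol1 _ (headD_mem _ h1.1) 0)
  have hm2 : 1 ≤ rowMax 0 pol2 :=
    le_trans (List.length_pos_of_ne_nil (h2.2 _ (headD_mem _ h2.1)))
      (len_le_rowMax pol2 _ (headD_mem _ h2.1) 0)
  have hn1 := List.length_pos_of_ne_nil h1.1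
  have hn2 := List.length_pos_of_ne_nil h2.1
  have hglen : (gridB pol1 pol2).length = pol1.length + pol2.length - 1 := by
    unfold gridB; rw [List.length_map, List.length_range]
  have hgne : gridB pol1 pol2 ≠ [] := by
    apply List.ne_nil_of_length_pos
    rw [hglen]; omega
  have hgrows : ∀ r ∈ gridB pol1 pol2, r ≠ [] := by
    intro r hr
    obtain ⟨kk, _, rfl⟩ := List.mem_map.1 hr
    apply List.ne_nil_of_length_pos
    rw [List.length_map, List.length_range]
    omega
  rw [mult2v_alt_eq, canonB_eq]
  refine ⟨normalize2v_canon _ hgne hgrows, fun k l => ?_⟩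
  rw [normalize2v_coeff]
  by_cases hk : k < pol1.length + pol2.length - 1
  · have hrowk : (gridB pol1 pol2).getD k [] =
        (List.range (rowMax 0 pol1 + rowMax 0 pol2 - 1)).map (entryB pol1 pol2 k) := by
      unfold gridB
      rw [List.getD_eq_getElem _ _ (by rw [List.length_map, List.length_range]; omega),
          List.getElem_map, List.getElem_range]
    by_cases hl : l < rowMax 0 pol1 + rowMax 0 pol2 - 1
    · have hentry : coeffB (gridB pol1 pol2) k l = entryB pol1 pol2 k l := by
        unfold coeffB
        rw [hrowk, List.getD_eq_getElem _ _ (by rw [List.length_map, List.length_range]; omega),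
            List.getElem_map, List.getElem_range]
      rw [hentry]
      unfold entryB Fsum
      have hinner : ∀ i : Nat,
          ((List.range' ((l+1) - rowMax 0 pol2)
              (min (l+1) (pol1.getD i []).length - ((l+1) - rowMax 0 pol2))).map (fun j =>
            coeffB pol1 i j * coeffB pol2 (k - i) (l - j))).sum
          = ((List.range (l+1)).map (fun j =>
            coeffB pol1 i j * coeffB pol2 (k - i) (l - j))).sum := by
        intro i
        apply sum_window
        · omega
        · intro j hj
          rw [coeffB_zero_of_rowMax pol2 _ _ (by omega), mul_zero]
        · intro j hjb hjN
          rw [coeffB_zero_of_row pol1 _ _ (by omega), zero_mul]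
      rw [List.map_congr_left (fun i _ => hinner i)]
      apply sum_window
      · omega
      · intro i hi
        apply List.sum_eq_zero
        intro x hx
        obtain ⟨j, _, rfl⟩ := List.mem_map.1 hx
        rw [coeffB_zero_of_len pol2 _ _ (by omega), mul_zero]
      · intro i hib hiN
        apply List.sum_eq_zero
        intro x hx
        obtain ⟨j, _, rfl⟩ := List.mem_map.1 hx
        rw [coeffB_zero_of_len pol1 _ _ (by omega), zero_mul]
    · rw [coeffB_zero_of_row _ _ _ (by
        rw [hrowk, List.length_map, List.length_range]; omega)]
      exact (Fsum_zero_l pol1 pol2 hm1 k l (by omega)).symm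
  · rw [coeffB_zero_of_len _ _ _ (by rw [hglen]; omega)]
    exact (Fsum_zero_k pol1 pol2 h1.1 k l (by omega)).symm

-- ===== final agreement =====
theorem mult2v_agrees (pol1 pol2 : List (List Int)) (h : Pre_mult2v pol1 pol2) :
    mult2v pol1 pol2 = mult2v_alt pol1 pol2 := by
  obtain ⟨a, b, c, d⟩ := h
  have h1 : RowsNE pol1 := ⟨a, c⟩
  have h2 : RowsNE pol2 := ⟨b, d⟩
  have hA := multA_spec pol1 pol2 h1 h2
  have hB := multB_spec pol1 pol2 h1 h2
  exact canon_unique _ _ hA.1 hB.1 (fun i j => (hA.2 i j).trans (hB.2 i j).symm)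

-- ===== VERDICT =====
theorem mult2v_spec : Claim_equal_mult2v := by
  intro pol1 pol2 _hdom hpre
  exact mult2v_agrees pol1 pol2 hpre
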